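-- pv_equiv track=rewrite | github.com/Fandazdik/trombone-partials | trombone.py | get_note_positions
-- ===== SOURCE A (Python) =====
-- def get_note_positions(input_position, any_octave = False):
--     final_position_list = []
--     for position in range(1, 8):
--         root_number = 7 - position
--         for add_interval in [(0, 1), (7, 2), (12, 3), (16, 4), (19, 5)]:
--             unmodded_note = root_number + add_interval[0]
--             if any_octave:
--                 if unmodded_note % 12 == input_position:
--                     final_position_list.append((position, add_interval[1]))
--             else:
--                 if unmodded_note == input_position:
--                     final_position_list.append((position, add_interval[1]))
--     return final_position_list #Returns (position, partial)
-- ===== SOURCE B (Python) =====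
-- def get_note_positions(input_position, any_octave = False):
--     matches = []
--     for offset, partial in [(0, 1), (7, 2), (12, 3), (16, 4), (19, 5)]:
--         if any_octave:
--             # root + offset == input_position (mod 12) with root in 0..6,
--             # and the compared residue is always in 0..11
--             if 0 <= input_position < 12:
--                 root = (input_position - offset) % 12
--                 if root <= 6:
--                     matches.append((7 - root, partial))
--         else:
--             position = 7 - input_position + offset
--             if 1 <= position <= 7:
--                 matches.append((position, partial))
--     return sorted(matches)
-- ===== Notes on version B (the rewrite author's own statement) =====
-- stated objective: alternative
-- what changed: Replaces the 7x5 brute-force scan over all slide positions with a direct inversion over the five (offset, partial) pairs, collecting at most five candidate positions and sorting them by (position, partial) to restore A's emission order.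
import Mathlib
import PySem

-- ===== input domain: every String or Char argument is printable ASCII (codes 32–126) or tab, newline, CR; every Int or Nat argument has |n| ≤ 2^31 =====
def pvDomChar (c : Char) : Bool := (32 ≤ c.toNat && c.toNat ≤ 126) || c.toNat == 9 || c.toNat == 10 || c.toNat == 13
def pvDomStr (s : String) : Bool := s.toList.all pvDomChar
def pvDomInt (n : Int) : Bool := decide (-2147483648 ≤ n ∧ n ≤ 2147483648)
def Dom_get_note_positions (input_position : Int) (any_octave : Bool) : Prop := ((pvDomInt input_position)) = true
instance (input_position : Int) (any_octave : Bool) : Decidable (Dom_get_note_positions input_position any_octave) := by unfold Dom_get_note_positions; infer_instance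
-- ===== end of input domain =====

-- B replaces A's 7×5 brute-force double loop by a direct inversion over the five
-- (offset, partial) pairs, sorting the collected matches by (position, partial) at the end.
-- ===== PORT A =====
def get_note_positions (input_position : Int) (any_octave : Bool) : List (Int × Int) :=
  (PySem.List.pyRange 1 8 1).foldl (fun acc position =>
    let root_number := 7 - position
    (([(0, 1), (7, 2), (12, 3), (16, 4), (19, 5)] : List (Int × Int)).foldl (fun acc add_interval =>
      let unmodded_note := root_number + add_interval.1
      if any_octave then
        if PySem.Int.mod unmodded_note 12 = input_position then acc ++ [(position, add_interval.2)] else acc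
      else
        if unmodded_note = input_position then acc ++ [(position, add_interval.2)] else acc) acc)) []

-- ===== PORT B =====
def get_note_positions_alt (input_position : Int) (any_octave : Bool) : List (Int × Int) :=
  let ms :=
    ([(0, 1), (7, 2), (12, 3), (16, 4), (19, 5)] : List (Int × Int)).foldl (fun acc oi =>
      if any_octave then
        if 0 ≤ input_position ∧ input_position < 12 then
          let root := PySem.Int.mod (input_position - oi.1) 12
          if root ≤ 6 then acc ++ [(7 - root, oi.2)] else acc
        else acc
      else
        let position := 7 - input_position + oi.1
        if 1 ≤ position ∧ position ≤ 7 then acc ++ [(position, oi.2)] else acc) []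
  PySem.List.sorted2 ms (fun p => p.1) (fun p => p.2)

-- ===== PRECONDITION & SPEC =====
def Spec_get_note_positions (input_position : Int) (any_octave : Bool) (out : List (Int × Int)) : Prop := out = get_note_positions_alt input_position any_octave
instance (input_position : Int) (any_octave : Bool) (out : List (Int × Int)) : Decidable (Spec_get_note_positions input_position any_octave out) := by unfold Spec_get_note_positions; infer_instance

-- ===== CLAIM (what is proved, stated in full; the proofs are below) =====
def Claim_equal_get_note_positions : Prop := ∀ (input_position : Int) (any_octave : Bool), Dom_get_note_positions input_position any_octave → Spec_get_note_positions input_position any_octave (get_note_positions input_position any_octave)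

-- ===== LEMMAS AND PROOFS =====

lemma pyRange_1_8 : PySem.List.pyRange 1 8 1 = [1, 2, 3, 4, 5, 6, 7] := by decide

-- a foldl whose step never changes the accumulator returns its initial value
lemma foldl_fix {α β : Type} (f : α → β → α) (l : List β) (init : α)
    (h : ∀ acc x, x ∈ l → f acc x = acc) : l.foldl f init = init := by
  induction l generalizing init with
  | nil => rfl
  | cons a t ih =>
    rw [List.foldl_cons, h init a (by simp)]
    exact ih init (fun acc x hx => h acc x (by simp [hx]))

lemma ports_agree (ip : Int) (ao : Bool) :
    get_note_positions ip ao = get_note_positions_alt ip ao := by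
  cases ao with
  | true =>
    by_cases h : 0 ≤ ip ∧ ip < 12
    · obtain ⟨h0, h1⟩ := h
      interval_cases ip <;> decide
    · have hA : get_note_positions ip true = [] := by
        simp only [get_note_positions]
        refine foldl_fix _ _ _ ?_
        intro acc x _
        refine foldl_fix _ _ _ ?_
        intro acc2 y _
        simp
        omega
      have hB : get_note_positions_alt ip true = [] := by
        simp only [get_note_positions_alt]
        rw [foldl_fix _ _ _ (by intro acc x _; simp [h])]
        decide
      rw [hA, hB]
  | false =>
    by_cases h : 0 ≤ ip ∧ ip ≤ 25
    · obtain ⟨h0, h1⟩ := h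
      interval_cases ip <;> decide
    · have hA : get_note_positions ip false = [] := by
        simp only [get_note_positions, pyRange_1_8]
        refine foldl_fix _ _ _ ?_
        intro acc x hx
        refine foldl_fix _ _ _ ?_
        intro acc2 y hy
        fin_cases hx <;> fin_cases hy <;> simp <;> omega
      have hB : get_note_positions_alt ip false = [] := by
        simp only [get_note_positions_alt]
        rw [foldl_fix _ _ _ ?_]
        · decide
        · intro acc y hy
          fin_cases hy <;> simp <;> omega
      rw [hA, hB]

-- ===== VERDICT (by name: the statement is the Claim_ definition above) =====
theorem get_note_positions_spec : Claim_equal_get_note_positions := by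
  intro ip ao _
  unfold Spec_get_note_positions
  exact ports_agree ip ao
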